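-- pv_equiv track=rewrite | github.com/openhive-network/hivemind | hive/server/common/mute_reasons.py | decode_bitwise_mask
-- ===== SOURCE A (Python) =====
-- def decode_bitwise_mask(muted_reasons_mask):
--     if not isinstance(muted_reasons_mask, int):
--         raise ValueError("Input must be an integer")
--     if muted_reasons_mask < 0:
--         raise ValueError("Mask cannot be negative")
--
--     muted_reasons = []
--     for i in range(32):  # Assuming a 32-bit integer
--         if muted_reasons_mask & (1 << i):
--             muted_reasons.append(i)
--     return muted_reasons
-- ===== SOURCE B (Python) =====
-- def decode_bitwise_mask(muted_reasons_mask):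
--     if not isinstance(muted_reasons_mask, int):
--         raise ValueError("Input must be an integer")
--     if muted_reasons_mask < 0:
--         raise ValueError("Mask cannot be negative")
--
--     mask = muted_reasons_mask & 0xFFFFFFFF  # same 32-bit window as A's range(32)
--     muted_reasons = []
--     pos = 0
--     while mask:
--         if mask & 1:
--             muted_reasons.append(pos)
--         mask >>= 1
--         pos += 1
--     return muted_reasons
-- ===== Notes on version B (the rewrite author's own statement) =====
-- stated objective: alternative
-- what changed: B replaces A's fixed 32-iteration scan testing muted_reasons_mask & (1 << i) for every i with a loop that consumes the mask itself (mask &= 0xFFFFFFFF once, then test the low bit and shift right until the mask is empty), stopping as soon as no set bits remain.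
import Mathlib
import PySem

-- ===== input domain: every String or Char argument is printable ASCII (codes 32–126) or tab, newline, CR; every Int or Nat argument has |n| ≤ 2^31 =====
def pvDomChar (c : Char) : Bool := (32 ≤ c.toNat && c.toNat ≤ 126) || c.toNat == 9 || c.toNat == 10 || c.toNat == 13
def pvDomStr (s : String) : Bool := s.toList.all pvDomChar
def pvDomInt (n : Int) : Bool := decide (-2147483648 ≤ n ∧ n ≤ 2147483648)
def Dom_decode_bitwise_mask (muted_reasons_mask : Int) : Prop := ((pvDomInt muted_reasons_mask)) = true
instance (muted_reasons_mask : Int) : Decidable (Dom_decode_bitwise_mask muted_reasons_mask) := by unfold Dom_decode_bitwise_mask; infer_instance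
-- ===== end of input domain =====

-- B consumes the 32-bit window of the mask (test low bit, shift right) instead of A's
-- fixed 32-iteration scan with (1 << i) tests; same return value on every non-negative mask.


-- ===== PORT A =====
-- 'isinstance' guard is vacuous under the type convention; the negative-mask ValueError
-- is excluded by Pre_. 'mask & (1 << i)' is PySem.Int.band (exact Python &).
def decode_bitwise_mask (muted_reasons_mask : Int) : List Int :=
  (List.range 32).foldl
    (fun (acc : List Int) (i : Nat) =>
      if PySem.Int.band muted_reasons_mask ((1 : Int) <<< i) ≠ 0 then acc ++ [(i : Int)]
      else acc) []

-- ===== PORT B =====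
-- the while loop of Source B; its mask is ≥ 0 after '& 0xFFFFFFFF', so a Nat state is exact
-- ('mask & 1' = mask &&& 1, 'mask >>= 1' = mask >>> 1)
def pvBitLoop (mask : Nat) (pos : Int) : List Int :=
  if h : mask = 0 then []
  else (if mask &&& 1 ≠ 0 then [pos] else []) ++ pvBitLoop (mask >>> 1) (pos + 1)
  termination_by mask
  decreasing_by simpa [Nat.shiftRight_one] using Nat.div_lt_self (Nat.pos_of_ne_zero h) (by norm_num)

def decode_bitwise_mask_alt (muted_reasons_mask : Int) : List Int :=
  pvBitLoop (PySem.Int.band muted_reasons_mask 0xFFFFFFFF).toNat 0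

-- ===== PRECONDITION & SPEC =====
-- Pre_ excludes exactly the negative masks, on which A raises ValueError("Mask cannot be negative").
def Pre_decode_bitwise_mask (muted_reasons_mask : Int) : Prop := 0 ≤ muted_reasons_mask
instance (muted_reasons_mask : Int) : Decidable (Pre_decode_bitwise_mask muted_reasons_mask) := by unfold Pre_decode_bitwise_mask; infer_instance
def pvWitness_decode_bitwise_mask : Int := (5)

def Spec_decode_bitwise_mask (muted_reasons_mask : Int) (out : List Int) : Prop := out = decode_bitwise_mask_alt muted_reasons_mask
instance (muted_reasons_mask : Int) (out : List Int) : Decidable (Spec_decode_bitwise_mask muted_reasons_mask out) := by unfold Spec_decode_bitwise_mask; infer_instance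

-- ===== CLAIM (what is proved, stated in full; the proofs are below) =====
def Claim_equal_decode_bitwise_mask : Prop := ∀ (muted_reasons_mask : Int), Dom_decode_bitwise_mask muted_reasons_mask → Pre_decode_bitwise_mask muted_reasons_mask → Spec_decode_bitwise_mask muted_reasons_mask (decode_bitwise_mask muted_reasons_mask)

-- ===== LEMMAS AND PROOFS =====

-- A's loop shape: append-if over a list is filter-then-map
lemma foldl_append_if_int (l : List Nat) (p : Nat → Prop) [DecidablePred p] (acc : List Int) :
    l.foldl (fun (acc : List Int) (i : Nat) => if p i then acc ++ [(i : Int)] else acc) acc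
      = acc ++ (l.filter (fun i => decide (p i))).map (fun (i : Nat) => (i : Int)) := by
  induction l generalizing acc with
  | nil => simp
  | cons x xs ih =>
    by_cases hx : p x <;> simp [List.foldl_cons, hx, ih]

-- B's loop lists the set-bit positions (offset by pos) of any m < 2^k, in increasing order
lemma pvBitLoop_eq (k : Nat) : ∀ (m : Nat), m < 2 ^ k → ∀ (pos : Int),
    pvBitLoop m pos = ((List.range k).filter (fun i => m.testBit i)).map (fun (i : Nat) => pos + (i : Int)) := by
  induction k with
  | zero =>
    intro m hm pos
    interval_cases m
    simp [pvBitLoop]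
  | succ k ih =>
    intro m hm pos
    by_cases h0 : m = 0
    · subst h0; simp [pvBitLoop]
    · rw [pvBitLoop]
      simp only [h0, dite_false]
      rw [Nat.shiftRight_one, ih (m / 2) (by omega) (pos + 1), List.range_succ_eq_map,
          List.filter_cons]
      have hfilter : List.filter ((fun i => m.testBit i) ∘ Nat.succ) (List.range k)
          = List.filter (fun i => (m / 2).testBit i) (List.range k) := by
        apply List.filter_congr; intro i _
        simp [Function.comp, Nat.succ_eq_add_one, Nat.testBit_add_one]
      have hmap : (List.filter (fun i => (m / 2).testBit i) (List.range k)).map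
            (fun (i : Nat) => (pos + 1) + (i : Int))
          = ((List.filter (fun i => (m / 2).testBit i) (List.range k)).map Nat.succ).map
            (fun (i : Nat) => pos + (i : Int)) := by
        rw [List.map_map]; apply List.map_congr_left; intro i _
        simp [Function.comp, Nat.succ_eq_add_one]; ring
      rw [List.filter_map]
      cases hb : m.testBit 0 with
      | true =>
        have hm2 : m % 2 = 1 := by rw [Nat.testBit_zero] at hb; simpa using hb
        simp [hm2, hmap, hfilter]
      | false =>
        have hm2 : m % 2 = 0 := by
          rw [Nat.testBit_zero] at hb
          rcases Nat.mod_two_eq_zero_or_one m with h | h <;> simp [h] at hb ⊢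
        simp [hm2, hmap, hfilter]

-- A's bit test equals Nat.testBit for a non-negative mask
lemma band_shift_test (m i : Nat) :
    (PySem.Int.band (m : Int) ((1 : Int) <<< i) ≠ 0) ↔ m.testBit i = true := by
  have h1 : ((1 : Int) <<< i) = (((1 <<< i : Nat) : Nat) : Int) := by
    simp [Int.shiftLeft_eq, Nat.shiftLeft_eq]
  rw [h1, PySem.Int.band_natCast, Nat.one_shiftLeft, Nat.and_two_pow]
  cases hb : m.testBit i <;> simp [hb]

-- ===== VERDICT (by name: the statement is the Claim_ definition above) =====
theorem decode_bitwise_mask_spec : Claim_equal_decode_bitwise_mask := by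
  intro mask hDom hPre
  unfold Spec_decode_bitwise_mask
  obtain ⟨m, rfl⟩ : ∃ m : Nat, mask = (m : Int) := ⟨mask.toNat, (Int.toNat_of_nonneg hPre).symm⟩
  have hm32 : m < 2 ^ 32 := by
    unfold Dom_decode_bitwise_mask pvDomInt at hDom
    have : (m : Int) ≤ 2147483648 := by simpa using (of_decide_eq_true hDom).2
    omega
  -- B side: the & 0xFFFFFFFF window keeps m unchanged
  have hwin : (PySem.Int.band (m : Int) 0xFFFFFFFF).toNat = m := by
    have : (0xFFFFFFFF : Int) = ((0xFFFFFFFF : Nat) : Int) := by norm_num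
    rw [this, PySem.Int.band_natCast]
    have : m &&& 0xFFFFFFFF = m % 2 ^ 32 := Nat.and_two_pow_sub_one_eq_mod m 32
    simp [this]
    omega
  rw [decode_bitwise_mask_alt, hwin, pvBitLoop_eq 32 m hm32 0]
  -- A side: fold is filter-then-map with the same test
  rw [decode_bitwise_mask,
      foldl_append_if_int (List.range 32) (fun i => PySem.Int.band (m : Int) ((1 : Int) <<< i) ≠ 0) []]
  simp only [List.nil_append]
  have hpred : (List.range 32).filter
        (fun (i : Nat) => decide (PySem.Int.band (m : Int) ((1 : Int) <<< i) ≠ 0))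
      = (List.range 32).filter (fun i => m.testBit i) := by
    apply List.filter_congr; intro i _
    simp [band_shift_test m i]
  rw [hpred]
  apply List.map_congr_left; intro i _
  simp
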